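-- pv_equiv track=rewrite | github.com/jia-zhuang/seqlab | utils.py | generate_label_ids
-- ===== SOURCE A (Python) =====
-- def generate_label_ids(token_spans, ignore_mask, ignore_index=-100):
--     label_ids = [0] * len(ignore_mask)
--     for span, code in token_spans.items():
--         if span[0] < span[1]:  # valid span
--             label_ids[span[0]] = code  # B
--             label_ids[(span[0] + 1): span[1]] = [code + 1] * (span[1] - span[0] - 1)  # I
--
--     # ignore mask
--     for i, flag in enumerate(ignore_mask):
--         if flag == 0:
--             label_ids[i] = ignore_index
--
--     return label_ids
-- ===== SOURCE B (Python) =====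
-- def generate_label_ids(token_spans, ignore_mask, ignore_index=-100):
--     spans = list(token_spans.items())
--
--     def label_at(i):
--         # last span written wins in A, so scan spans newest-first and
--         # take the first valid span that covers position i
--         for span, code in reversed(spans):
--             if span[0] < span[1] and span[0] <= i < span[1]:
--                 return code if i == span[0] else code + 1
--         return 0
--
--     return [ignore_index if flag == 0 else label_at(i)
--             for i, flag in enumerate(ignore_mask)]
-- ===== Notes on version B (the rewrite author's own statement) =====
-- stated objective: alternative
-- what changed: Replaces A's span-major fill (mutating a list via index and slice assignment, then a masking pass) by a position-major algorithm: for each output index a reverse scan over the spans returns the label of the newest valid span covering it (last-write-wins), emitted in one comprehension over enumerate(ignore_mask).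
-- outside the precondition, e.g. on generate_label_ids({(-1, 1): 5}, [1, 1], -100): A returns [6, 5], B returns [6, 0]; on generate_label_ids({(0, 3): 5}, [1], -100): A returns [5, 6, 6], B returns [5]
import Mathlib
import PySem

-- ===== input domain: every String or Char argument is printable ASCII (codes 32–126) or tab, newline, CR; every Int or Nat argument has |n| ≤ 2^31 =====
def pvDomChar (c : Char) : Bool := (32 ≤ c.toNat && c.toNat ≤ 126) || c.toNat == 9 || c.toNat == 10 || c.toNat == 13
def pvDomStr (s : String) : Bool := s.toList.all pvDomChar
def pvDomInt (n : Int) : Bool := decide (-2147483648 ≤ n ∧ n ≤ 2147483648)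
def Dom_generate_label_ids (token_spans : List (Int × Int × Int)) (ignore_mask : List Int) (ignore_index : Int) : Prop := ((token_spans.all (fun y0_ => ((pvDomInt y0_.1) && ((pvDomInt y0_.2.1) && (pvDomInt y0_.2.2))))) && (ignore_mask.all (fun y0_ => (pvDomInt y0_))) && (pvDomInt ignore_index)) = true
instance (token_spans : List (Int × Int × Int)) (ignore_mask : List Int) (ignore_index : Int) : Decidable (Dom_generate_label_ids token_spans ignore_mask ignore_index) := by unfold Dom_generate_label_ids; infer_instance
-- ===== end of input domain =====

-- B replaces A's span-major fill-then-mask list mutation by a position-major reverse scan: each output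
-- index gets the label of the NEWEST valid span covering it (alternative decomposition, same task).
-- token_spans is a Python dict {(start, stop): code}, encoded as an association list of triples.

-- ===== PORT A =====
-- Python list index assignment xs[i] = v, negative index wraps; out-of-range raises IndexError
-- (excluded by Pre_), where this total form leaves the list unchanged.
def pySetIdxA (xs : List Int) (i v : Int) : List Int :=
  let j : Int := if i < 0 then i + (xs.length : Int) else i
  if 0 ≤ j ∧ j < (xs.length : Int) then xs.set j.toNat v else xs

-- Python slice assignment xs[a:b] = repl, bounds clamped exactly like xs[a:b]; exact for all Int bounds.
def pySliceAssignA (xs : List Int) (a b : Int) (repl : List Int) : List Int :=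
  let n : Int := xs.length
  let lo : Int := max 0 (min n (if a < 0 then a + n else a))
  let hi : Int := max lo (min n (if b < 0 then b + n else b))
  xs.take lo.toNat ++ repl ++ xs.drop hi.toNat

-- loop body of A's first loop: 'if span[0] < span[1]: label_ids[span[0]] = code; label_ids[a+1:b] = [code+1]*(b-a-1)'
def stepA (L : List Int) (t : Int × Int × Int) : List Int :=
  if t.1 < t.2.1 then
    pySliceAssignA (pySetIdxA L t.1 t.2.2) (t.1 + 1) t.2.1
      (PySem.List.pyRepeat [t.2.2 + 1] (t.2.1 - t.1 - 1))
  else L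

def generate_label_ids (token_spans : List (Int × Int × Int)) (ignore_mask : List Int) (ignore_index : Int) : List Int :=
  let label_ids := token_spans.foldl stepA (List.replicate ignore_mask.length 0)
  (PySem.List.enumerate ignore_mask).foldl
    (fun L p => if p.2 = 0 then pySetIdxA L p.1 ignore_index else L) label_ids

-- ===== PORT B =====
-- B's inner 'for span, code in reversed(spans): if cond: return …; return 0', as a recursion over
-- the already-reversed span list
def labelAtB : List (Int × Int × Int) → Int → Int
  | [], _ => 0
  | t :: rest, i =>
    if t.1 < t.2.1 ∧ t.1 ≤ i ∧ i < t.2.1 then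
      (if i = t.1 then t.2.2 else t.2.2 + 1)
    else labelAtB rest i

def generate_label_ids_alt (token_spans : List (Int × Int × Int)) (ignore_mask : List Int) (ignore_index : Int) : List Int :=
  (PySem.List.enumerate ignore_mask).map
    (fun p => if p.2 = 0 then ignore_index else labelAtB token_spans.reverse p.1)

-- ===== PRECONDITION & SPEC =====
-- Pre_ excludes valid spans reaching outside [0, len(ignore_mask)]: a negative start makes A write via
-- Python's negative-index wraparound and a stop beyond the length makes A's slice assignment GROW the
-- list (or A raises IndexError when the start is out of range entirely); B's range-check does neither.
def Pre_generate_label_ids (token_spans : List (Int × Int × Int)) (ignore_mask : List Int) (ignore_index : Int) : Prop :=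
  ∀ t ∈ token_spans, t.1 < t.2.1 → 0 ≤ t.1 ∧ t.2.1 ≤ (ignore_mask.length : Int)
instance (token_spans : List (Int × Int × Int)) (ignore_mask : List Int) (ignore_index : Int) : Decidable (Pre_generate_label_ids token_spans ignore_mask ignore_index) := by unfold Pre_generate_label_ids; infer_instance

def pvWitness_generate_label_ids : (List (Int × Int × Int)) × List Int × Int :=
  ([(0, 2, 5), (3, 4, 7)], [1, 1, 0, 1, 1], -100)

def Spec_generate_label_ids (token_spans : List (Int × Int × Int)) (ignore_mask : List Int) (ignore_index : Int) (out : List Int) : Prop := out = generate_label_ids_alt token_spans ignore_mask ignore_index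
instance (token_spans : List (Int × Int × Int)) (ignore_mask : List Int) (ignore_index : Int) (out : List Int) : Decidable (Spec_generate_label_ids token_spans ignore_mask ignore_index out) := by unfold Spec_generate_label_ids; infer_instance

-- ===== CLAIM (what is proved, stated in full; the proofs are below) =====
def Claim_equal_generate_label_ids : Prop := ∀ (token_spans : List (Int × Int × Int)) (ignore_mask : List Int) (ignore_index : Int), Dom_generate_label_ids token_spans ignore_mask ignore_index → Pre_generate_label_ids token_spans ignore_mask ignore_index → Spec_generate_label_ids token_spans ignore_mask ignore_index (generate_label_ids token_spans ignore_mask ignore_index)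

-- ===== LEMMAS AND PROOFS =====

theorem pySetIdxA_of_nonneg (L : List Int) (i v : Int) (h0 : 0 ≤ i) (h1 : i < (L.length : Int)) :
    pySetIdxA L i v = L.set i.toNat v := by
  unfold pySetIdxA
  have hn : ¬ i < 0 := by omega
  simp [hn, h0, h1]

theorem pySliceAssignA_eq (L : List Int) (a b : Int) (repl : List Int)
    (h0 : 0 ≤ a) (hab : a ≤ b) (hb : b ≤ (L.length : Int)) :
    pySliceAssignA L a b repl = L.take a.toNat ++ repl ++ L.drop b.toNat := by
  unfold pySliceAssignA
  have h1 : ¬ a < 0 := by omega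
  have h2 : ¬ b < 0 := by omega
  have hlo : max 0 (min (L.length : Int) a) = a := by omega
  have hhi : max a (min (L.length : Int) b) = b := by omega
  simp [h1, h2, hlo, hhi]

theorem stepA_eq (L : List Int) (t : Int × Int × Int) (hv : t.1 < t.2.1)
    (h0 : 0 ≤ t.1) (hb2 : t.2.1 ≤ (L.length : Int)) :
    stepA L t = (L.set t.1.toNat t.2.2).take (t.1.toNat + 1)
      ++ List.replicate (t.2.1 - t.1 - 1).toNat (t.2.2 + 1)
      ++ (L.set t.1.toNat t.2.2).drop t.2.1.toNat := by
  unfold stepA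
  rw [if_pos hv, pySetIdxA_of_nonneg L t.1 t.2.2 h0 (by omega),
    PySem.List.pyRepeat_singleton,
    pySliceAssignA_eq _ _ _ _ (by omega) (by omega) (by rw [List.length_set]; omega)]
  have h : (t.1 + 1).toNat = t.1.toNat + 1 := by omega
  rw [h]

theorem stepA_length (L : List Int) (t : Int × Int × Int)
    (hb : t.1 < t.2.1 → 0 ≤ t.1 ∧ t.2.1 ≤ (L.length : Int)) :
    (stepA L t).length = L.length := by
  by_cases hv : t.1 < t.2.1
  · obtain ⟨h0, hb2⟩ := hb hv
    rw [stepA_eq L t hv h0 hb2]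
    simp only [List.length_append, List.length_take, List.length_drop, List.length_set,
      List.length_replicate]
    omega
  · unfold stepA; rw [if_neg hv]

-- one span step, list side: stepA writes exactly the span's cells (under the bounds Pre_ gives)
theorem stepA_getElem? (L : List Int) (t : Int × Int × Int)
    (hb : t.1 < t.2.1 → 0 ≤ t.1 ∧ t.2.1 ≤ (L.length : Int)) (k : Nat) :
    (stepA L t)[k]? =
      if t.1 < t.2.1 ∧ t.1 ≤ (k : Int) ∧ (k : Int) < t.2.1 then
        some (if (k : Int) = t.1 then t.2.2 else t.2.2 + 1)
      else L[k]? := by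
  by_cases hv : t.1 < t.2.1
  · obtain ⟨h0, hb2⟩ := hb hv
    rw [stepA_eq L t hv h0 hb2]
    have hTlen : ((L.set t.1.toNat t.2.2).take (t.1.toNat + 1)).length = t.1.toNat + 1 := by
      simp only [List.length_take, List.length_set]; omega
    have hRlen : (List.replicate (t.2.1 - t.1 - 1).toNat ((t.2.2 : Int) + 1)).length
        = (t.2.1 - t.1 - 1).toNat := List.length_replicate
    by_cases hk1 : k < t.1.toNat + 1
    · rw [List.getElem?_append_left (by rw [List.length_append, hTlen, hRlen]; omega),
        List.getElem?_append_left (by omega), List.getElem?_take, if_pos hk1,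
        List.getElem?_set]
      by_cases hka : k = t.1.toNat
      · have hlt : t.1.toNat < L.length := by omega
        have hki : (k : Int) = t.1 := by omega
        rw [if_pos hka.symm, if_pos hlt, if_pos ⟨hv, by omega, by omega⟩, if_pos hki]
      · have hne : ¬ t.1.toNat = k := fun h => hka h.symm
        have hki : ¬ t.1 ≤ (k : Int) := by omega
        simp [hne, hv, hki]
    · by_cases hk2 : k < t.2.1.toNat
      · rw [List.getElem?_append_left (by rw [List.length_append, hTlen, hRlen]; omega),
          List.getElem?_append_right (by omega), hTlen, List.getElem?_replicate,
          if_pos (by omega)]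
        have hc1 : t.1 ≤ (k : Int) ∧ (k : Int) < t.2.1 := by omega
        have hc2 : ¬ (k : Int) = t.1 := by omega
        simp [hv, hc1, hc2]
      · rw [List.getElem?_append_right (by rw [List.length_append, hTlen, hRlen]; omega),
          List.length_append, hTlen, hRlen, List.getElem?_drop]
        have hidx : t.2.1.toNat + (k - (t.1.toNat + 1 + (t.2.1 - t.1 - 1).toNat)) = k := by omega
        rw [hidx, List.getElem?_set, if_neg (by omega)]
        have hc : ¬ ((k : Int) < t.2.1) := by omega
        simp [hc]
  · unfold stepA
    rw [if_neg hv, if_neg (by tauto)]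

-- whether some span of ts covers position i
def coversB (ts : List (Int × Int × Int)) (i : Int) : Bool :=
  ts.any (fun t => decide (t.1 < t.2.1 ∧ t.1 ≤ i ∧ i < t.2.1))

theorem labelAtB_append (xs ys : List (Int × Int × Int)) (i : Int) :
    labelAtB (xs ++ ys) i = if coversB xs i then labelAtB xs i else labelAtB ys i := by
  induction xs with
  | nil => simp [coversB]
  | cons t rest ih =>
    by_cases ht : t.1 < t.2.1 ∧ t.1 ≤ i ∧ i < t.2.1
    · have hc : coversB (t :: rest) i = true := by
        unfold coversB; rw [List.any_cons, decide_eq_true ht, Bool.true_or]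
      simp only [List.cons_append, labelAtB, if_pos ht, hc, if_true]
    · have hc : coversB (t :: rest) i = coversB rest i := by
        unfold coversB; rw [List.any_cons, decide_eq_false ht, Bool.false_or]
      simp only [List.cons_append, labelAtB, if_neg ht, hc]
      exact ih

theorem coversB_reverse (ts : List (Int × Int × Int)) (i : Int) :
    coversB ts.reverse i = coversB ts i := by
  simp [coversB]

theorem labelAtB_of_not_covers (ts : List (Int × Int × Int)) (i : Int)
    (h : coversB ts i = false) : labelAtB ts i = 0 := by
  induction ts with
  | nil => rfl
  | cons u us ihu =>
    simp only [coversB, List.any_cons, Bool.or_eq_false_iff] at h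
    rw [labelAtB, if_neg (by simpa using h.1)]
    exact ihu h.2

-- A's first loop, characterised pointwise against B's reverse scan
theorem fillA_getElem? (ts : List (Int × Int × Int)) (L : List Int) (k : Nat)
    (hb : ∀ t ∈ ts, t.1 < t.2.1 → 0 ≤ t.1 ∧ t.2.1 ≤ (L.length : Int)) :
    (ts.foldl stepA L).length = L.length ∧
    (ts.foldl stepA L)[k]? =
      if coversB ts (k : Int) then some (labelAtB ts.reverse (k : Int)) else L[k]? := by
  induction ts generalizing L with
  | nil => simp [coversB]
  | cons t rest ih =>
    have hbt := hb t (List.mem_cons_self ..)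
    have hlen := stepA_length L t hbt
    simp only [List.foldl_cons]
    obtain ⟨ihl, ihp⟩ := ih (stepA L t)
      (by intro u hu; rw [hlen]; exact hb u (List.mem_cons_of_mem _ hu))
    refine ⟨ihl.trans hlen, ?_⟩
    rw [ihp, stepA_getElem? L t hbt k]
    have hrev : labelAtB (t :: rest).reverse (k : Int)
        = if coversB rest (k : Int) then labelAtB rest.reverse (k : Int)
          else labelAtB [t] (k : Int) := by
      rw [List.reverse_cons, labelAtB_append, coversB_reverse]
    by_cases ht : t.1 < t.2.1 ∧ t.1 ≤ (k : Int) ∧ (k : Int) < t.2.1 <;>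
      by_cases hr : coversB rest (k : Int) = true
    · have hc : coversB (t :: rest) (k : Int) = true := by
        unfold coversB at hr ⊢; rw [List.any_cons, hr, Bool.or_true]
      rw [if_pos hr, if_pos hc, hrev, if_pos hr]
    · have hc : coversB (t :: rest) (k : Int) = true := by
        unfold coversB; rw [List.any_cons, decide_eq_true ht, Bool.true_or]
      rw [if_neg hr, if_pos ht, if_pos hc, hrev, if_neg hr]
      simp only [labelAtB, if_pos ht]
    · have hc : coversB (t :: rest) (k : Int) = true := by
        unfold coversB at hr ⊢; rw [List.any_cons, hr, Bool.or_true]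
      rw [if_pos hr, if_pos hc, hrev, if_pos hr]
    · have hc : ¬ (coversB (t :: rest) (k : Int) = true) := by
        unfold coversB at hr ⊢
        rw [List.any_cons]
        intro h
        rcases (Bool.or_eq_true _ _).mp h with h1 | h1
        · exact ht (of_decide_eq_true h1)
        · exact hr h1
      rw [if_neg hr, if_neg ht, if_neg hc]

-- A's second (masking) loop, characterised pointwise
theorem mask_inv (mask' : List Int) (s : Int) (L : List Int) (ii : Int)
    (hs : 0 ≤ s) (hlen : s.toNat + mask'.length ≤ L.length) :
    ((PySem.List.enumerate mask' s).foldl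
        (fun L p => if p.2 = 0 then pySetIdxA L p.1 ii else L) L).length = L.length ∧
    ∀ k : Nat,
      ((PySem.List.enumerate mask' s).foldl
        (fun L p => if p.2 = 0 then pySetIdxA L p.1 ii else L) L)[k]? =
      if s.toNat ≤ k ∧ k < s.toNat + mask'.length ∧ mask'[k - s.toNat]?.getD 1 = 0
      then some ii else L[k]? := by
  induction mask' generalizing s L with
  | nil =>
    rw [PySem.List.enumerate_nil]
    refine ⟨rfl, fun k => ?_⟩
    rw [if_neg (by simp)]
    rfl
  | cons x xs ih =>
    rw [PySem.List.enumerate_cons, List.foldl_cons]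
    have hsl : s < (L.length : Int) := by simp only [List.length_cons] at hlen; omega
    have hL1len : (if x = 0 then pySetIdxA L s ii else L).length = L.length := by
      split
      · rw [pySetIdxA_of_nonneg L s ii hs hsl, List.length_set]
      · rfl
    obtain ⟨ihl, ihp⟩ := ih (s + 1) (if x = 0 then pySetIdxA L s ii else L) (by omega)
      (by rw [hL1len]; simp only [List.length_cons] at hlen; omega)
    refine ⟨ihl.trans hL1len, fun k => ?_⟩
    rw [ihp k]
    have hsucc : (s + 1).toNat = s.toNat + 1 := by omega
    by_cases hkm : k = s.toNat
    · rw [if_neg (by omega), hkm]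
      have h0 : s.toNat - s.toNat = 0 := by omega
      simp only [h0, List.getElem?_cons_zero, List.length_cons, Option.getD_some]
      by_cases hx : x = 0
      · rw [if_pos hx, if_pos ⟨le_rfl, by omega, hx⟩,
          pySetIdxA_of_nonneg L s ii hs hsl, List.getElem?_set, if_pos rfl, if_pos (by omega)]
      · rw [if_neg hx, if_neg (fun h => hx h.2.2)]
    · have hLk : (if x = 0 then pySetIdxA L s ii else L)[k]? = L[k]? := by
        split
        · rw [pySetIdxA_of_nonneg L s ii hs hsl, List.getElem?_set, if_neg (by omega)]
        · rfl
      rw [hLk]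
      by_cases hgt : s.toNat + 1 ≤ k
      · have hsub : k - s.toNat = (k - (s.toNat + 1)) + 1 := by omega
        rw [hsucc, hsub, List.getElem?_cons_succ, List.length_cons]
        by_cases hc : s.toNat + 1 ≤ k ∧ k < s.toNat + 1 + xs.length ∧ xs[k - (s.toNat + 1)]?.getD 1 = 0
        · rw [if_pos hc, if_pos ⟨by omega, by omega, hc.2.2⟩]
        · rw [if_neg hc, if_neg (by intro h; exact hc ⟨by omega, by omega, h.2.2⟩)]
      · rw [if_neg (by omega), if_neg (by omega)]

-- ===== VERDICT (by name: the statement is the Claim_ definition above) =====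
theorem generate_label_ids_spec : Claim_equal_generate_label_ids := by
  intro ts mask ii _hdom hpre
  unfold Spec_generate_label_ids generate_label_ids generate_label_ids_alt
  have hn : (List.replicate mask.length (0 : Int)).length = mask.length := List.length_replicate
  have hbnd : ∀ t ∈ ts, t.1 < t.2.1 →
      0 ≤ t.1 ∧ t.2.1 ≤ ((List.replicate mask.length (0 : Int)).length : Int) := by
    intro t ht hv; rw [hn]; exact hpre t ht hv
  obtain ⟨hml, hmp⟩ := mask_inv mask 0 (ts.foldl stepA (List.replicate mask.length 0)) ii le_rfl
    (by rw [(fillA_getElem? ts (List.replicate mask.length 0) 0 hbnd).1, hn]; simp)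
  apply List.ext_getElem?
  intro k
  rw [hmp k]
  have hfill := fillA_getElem? ts (List.replicate mask.length 0) k hbnd
  simp only [Int.toNat_zero, Nat.zero_add, Nat.sub_zero, Nat.zero_le, true_and]
  rw [List.getElem?_map, PySem.List.getElem?_enumerate]
  by_cases hk : k < mask.length
  · rw [List.getElem?_eq_getElem hk]
    simp only [Option.map_some]
    by_cases hz : mask[k] = 0
    · rw [if_pos ⟨hk, by simp [hz]⟩]
      simp [hz]
    · rw [if_neg (by intro h; exact hz (by simpa using h.2)), hfill.2]
      by_cases hcov : coversB ts (k : Int)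
      · rw [if_pos hcov]
        simp [hz]
      · rw [if_neg hcov, List.getElem?_replicate, if_pos hk]
        have hB : labelAtB ts.reverse (k : Int) = 0 :=
          labelAtB_of_not_covers _ _ (by rw [coversB_reverse]; simpa using hcov)
        simp [hz, hB]
  · have hA : (List.foldl stepA (List.replicate mask.length 0) ts)[k]? = none := by
      have hnc : coversB ts (k : Int) = false := by
        simp only [coversB, List.any_eq_false, decide_eq_true_eq]
        rintro t ht ⟨hv, h1, h2⟩
        have := hpre t ht hv
        omega
      rw [hfill.2, hnc, if_neg (by simp), List.getElem?_replicate, if_neg hk]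
    have hB : mask[k]? = none := List.getElem?_eq_none (by omega)
    rw [if_neg (fun h => absurd h.1 (by omega)), hA, hB]
    rfl
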